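-- pv_equiv track=rewrite | github.com/OmkarKashyap/Multi-Hop-QG | data/data_utils.py | _strip_spaces
-- ===== SOURCE A (Python) =====
-- import collections
--
-- def _strip_spaces(text):
--     ns_chars = []
--     ns_to_s_map = collections.OrderedDict()
--     for (i, c) in enumerate(text):
--         if c == " ":
--             continue
--         ns_to_s_map[len(ns_chars)] = i
--         ns_chars.append(c)
--     ns_text = "".join(ns_chars)
--     return (ns_text, ns_to_s_map)
-- ===== SOURCE B (Python) =====
-- import collections
--
-- def _strip_spaces(text):
--     parts = text.split(" ")
--     offsets = []
--     off = 0
--     for part in parts: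
--         offsets.extend(range(off, off + len(part)))
--         off += len(part) + 1
--     return ("".join(parts), collections.OrderedDict(enumerate(offsets)))
-- ===== Notes on version B (the rewrite author's own statement) =====
-- stated objective: alternative
-- what changed: Replaces A's per-character loop (running counter populating a char list and the OrderedDict simultaneously) with a split-based algorithm: split the text on the space character, join the segments for ns_text, and build the index map from arithmetic ranges over cumulative segment lengths instead of any per-character space test.
import Mathlib
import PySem

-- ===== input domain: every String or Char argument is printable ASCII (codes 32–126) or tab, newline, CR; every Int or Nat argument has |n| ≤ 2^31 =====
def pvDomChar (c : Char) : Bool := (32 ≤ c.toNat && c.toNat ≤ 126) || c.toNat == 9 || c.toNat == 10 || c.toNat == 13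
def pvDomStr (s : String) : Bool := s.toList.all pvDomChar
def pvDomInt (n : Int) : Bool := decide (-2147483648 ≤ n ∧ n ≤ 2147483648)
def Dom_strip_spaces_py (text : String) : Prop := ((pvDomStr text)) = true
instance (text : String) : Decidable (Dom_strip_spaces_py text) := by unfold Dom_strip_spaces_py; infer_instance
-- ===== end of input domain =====

-- B replaces A's per-character counter/dict loop by a split-on-space algorithm: the map comes
-- from arithmetic ranges over segment lengths, ns_text from joining the segments; objective: alternative.

-- ===== PORT A =====
-- A's loop: one pass over enumerate(text), keeping (ns_chars, ns_to_s_map) as state.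
def stripSpacesLoopA (st : List Char × PySem.Dict Int Int) (ic : Int × Char) :
    List Char × PySem.Dict Int Int :=
  if ic.2 = ' ' then st
  else (st.1 ++ [ic.2], st.2.insert (st.1.length : Int) ic.1)

def strip_spaces_py (text : String) : String × (List (Int × Int)) :=
  let st := (PySem.List.enumerate text.toList 0).foldl stripSpacesLoopA ([], PySem.Dict.empty)
  -- "".join(ns_chars) of single characters is their concatenation (exact)
  (String.ofList st.1, st.2.items)

-- ===== PORT B =====
-- Source B's loop over the segments of text.split(" "): extend offsets by range(off, off+len(part)), advance off.
def stripSpacesLoopB (st : List Int × Int) (part : List Char) : List Int × Int :=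
  (st.1 ++ PySem.List.pyRange st.2 (st.2 + (part.length : Int)), st.2 + (part.length : Int) + 1)

def strip_spaces_py_alt (text : String) : String × (List (Int × Int)) :=
  let parts := PySem.Chars.splitOn text.toList [' ']
  let st := parts.foldl stripSpacesLoopB ([], 0)
  -- "".join(parts) and OrderedDict(enumerate(offsets)) ported exactly
  (String.ofList (PySem.Chars.join [] parts), PySem.List.enumerate st.1 0)

-- ===== PRECONDITION & SPEC =====
def Spec_strip_spaces_py (text : String) (out : String × (List (Int × Int))) : Prop := out = strip_spaces_py_alt text
instance (text : String) (out : String × (List (Int × Int))) : Decidable (Spec_strip_spaces_py text out) := by unfold Spec_strip_spaces_py; infer_instance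

-- ===== CLAIM =====
def Claim_equal_strip_spaces_py : Prop := ∀ (text : String), Dom_strip_spaces_py text → Spec_strip_spaces_py text (strip_spaces_py text)

-- ===== LEMMAS AND PROOFS =====

-- Recursive characterisation of splitOn on the single-char separator ' ' (proof helper only).
def simpleSplit : List Char → List Char → List (List Char)
  | cur, [] => [cur.reverse]
  | cur, c :: rest => if c = ' ' then cur.reverse :: simpleSplit [] rest else simpleSplit (c :: cur) rest

theorem splitOn_go_eq (l : List Char) : ∀ (cur : List Char) (acc : List (List Char)) (fuel : Nat),
    l.length ≤ fuel →
    PySem.Chars.splitOn.go [' '] fuel l cur acc = acc.reverse ++ simpleSplit cur l := by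
  induction l with
  | nil =>
    intro cur acc fuel _
    cases fuel <;> simp [PySem.Chars.splitOn.go, simpleSplit]
  | cons c rest ih =>
    intro cur acc fuel h
    cases fuel with
    | zero => simp at h
    | succ f =>
      by_cases hc : c = ' '
      · subst hc
        rw [show PySem.Chars.splitOn.go [' '] (f+1) (' '::rest) cur acc
              = PySem.Chars.splitOn.go [' '] f rest [] (cur.reverse :: acc) from by
            simp [PySem.Chars.splitOn.go, List.isPrefixOf]]
        rw [ih [] (cur.reverse :: acc) f (by simpa using h)]
        simp [simpleSplit]
      · rw [show PySem.Chars.splitOn.go [' '] (f+1) (c::rest) cur acc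
              = PySem.Chars.splitOn.go [' '] f rest (c :: cur) acc from by
            simp [PySem.Chars.splitOn.go, List.isPrefixOf]
            exact fun h => absurd h.symm hc]
        rw [ih (c :: cur) acc f (by simpa using h)]
        simp [simpleSplit, hc]

theorem splitOn_eq_simpleSplit (s : List Char) :
    PySem.Chars.splitOn s [' '] = simpleSplit [] s := by
  unfold PySem.Chars.splitOn
  rw [splitOn_go_eq s [] [] (s.length + 1) (by omega)]
  simp

theorem join_nil_eq_flatten (ps : List (List Char)) : PySem.Chars.join [] ps = ps.flatten := by
  induction ps with
  | nil => simp [PySem.Chars.join_nil]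
  | cons p rest ih =>
    cases rest with
    | nil => simp [PySem.Chars.join_singleton]
    | cons q r => rw [PySem.Chars.join_cons_cons, ih]; simp

theorem flatten_simpleSplit (l : List Char) : ∀ cur : List Char,
    (simpleSplit cur l).flatten = cur.reverse ++ l.filter (fun c => c ≠ ' ') := by
  induction l with
  | nil => intro cur; simp [simpleSplit]
  | cons c rest ih =>
    intro cur
    by_cases hc : c = ' '
    · subst hc; simp [simpleSplit, ih]
    · simp [simpleSplit, hc, ih (c :: cur)]

-- positions of the non-space characters of l, the first one sitting at original index off
def posList : Int → List Char → List Int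
  | _, [] => []
  | off, c :: rest => if c = ' ' then posList (off + 1) rest else off :: posList (off + 1) rest

theorem posList_eq_enum (l : List Char) : ∀ s : Int,
    posList s l = ((PySem.List.enumerate l s).filter (fun p => p.2 ≠ ' ')).map (fun p => p.1) := by
  induction l with
  | nil => intro s; simp [posList]
  | cons c rest ih =>
    intro s
    by_cases hc : c = ' ' <;>
      simp [posList, PySem.List.enumerate_cons, hc, ih (s + 1)]

theorem foldl_loopB_spec (l : List Char) : ∀ (cur : List Char) (offs : List Int) (p : Int),
    ((simpleSplit cur l).foldl stripSpacesLoopB (offs, p)).1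
      = offs ++ PySem.List.pyRange p (p + (cur.length : Int)) ++ posList (p + (cur.length : Int)) l := by
  induction l with
  | nil => intro cur offs p; simp [simpleSplit, stripSpacesLoopB, posList]
  | cons c rest ih =>
    intro cur offs p
    by_cases hc : c = ' '
    · subst hc
      simp only [simpleSplit, if_true, List.foldl_cons]
      rw [show stripSpacesLoopB (offs, p) cur.reverse
            = (offs ++ PySem.List.pyRange p (p + (cur.length : Int)), p + (cur.length : Int) + 1) from by
          simp [stripSpacesLoopB]]
      rw [ih [] _ _]
      simp [posList]
    · simp only [simpleSplit, if_neg hc]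
      rw [ih (c :: cur) offs p]
      have hr : PySem.List.pyRange p (p + ((c :: cur).length : Int))
          = PySem.List.pyRange p (p + (cur.length : Int)) ++ [p + (cur.length : Int)] := by
        have := PySem.List.pyRange_one_succ_right (a := p) (b := p + (cur.length : Int))
          (by omega)
        rw [show p + ((c :: cur).length : Int) = p + (cur.length : Int) + 1 by simp; ring]
        exact this
      rw [hr]
      simp only [posList, if_neg hc]
      rw [show p + (((c :: cur).length : Int)) = p + (cur.length : Int) + 1 by simp; ring]
      simp [List.append_assoc]

-- Invariant of A's loop: chars accumulate the kept characters, the dict appends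
-- fresh keys ns.length, ns.length+1, … paired with the kept original indices.
theorem stripSpacesLoopA_spec (l : List (Int × Char)) (ns : List Char) (d : PySem.Dict Int Int)
    (hk : ∀ k ∈ d.keys, k < (ns.length : Int)) :
    (l.foldl stripSpacesLoopA (ns, d)).1 = ns ++ (l.filter (fun p => p.2 ≠ ' ')).map (fun p => p.2) ∧
    (l.foldl stripSpacesLoopA (ns, d)).2.items =
      d.items ++ PySem.List.enumerate ((l.filter (fun p => p.2 ≠ ' ')).map (fun p => p.1)) (ns.length : Int) := by
  induction l generalizing ns d with
  | nil => simp
  | cons ic rest ih =>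
    by_cases hc : ic.2 = ' '
    · have := ih ns d hk
      simpa [stripSpacesLoopA, hc] using this
    · have hfresh : d.contains (ns.length : Int) = false := by
        rw [PySem.Dict.contains_eq_decide_mem_keys]
        simp only [decide_eq_false_iff_not]
        intro hmem
        exact lt_irrefl _ (hk _ hmem)
      have hk' : ∀ k ∈ (d.insert (ns.length : Int) ic.1).keys, k < (((ns ++ [ic.2]).length : Nat) : Int) := by
        intro k hkm
        rw [PySem.Dict.mem_keys_insert] at hkm
        rcases hkm with h | h
        · subst h; simp
        · have := hk _ h; simp only [List.length_append, List.length_cons, List.length_nil]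
          push_cast; omega
      have := ih (ns ++ [ic.2]) (d.insert (ns.length : Int) ic.1) hk'
      rcases this with ⟨h1, h2⟩
      have hstep : stripSpacesLoopA (ns, d) ic = (ns ++ [ic.2], d.insert (ns.length : Int) ic.1) := by
        simp [stripSpacesLoopA, hc]
      constructor
      · rw [List.foldl_cons, hstep, h1]; simp [hc]
      · rw [List.foldl_cons, hstep]
        rw [h2, PySem.Dict.items_insert_of_not_contains _ _ hfresh]
        simp only [List.filter_cons, decide_eq_true_eq,
          List.length_append, List.length_cons, List.length_nil]
        push_cast
        simp [PySem.List.enumerate_cons, hc, List.append_assoc]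

theorem filter_map_snd_enumerate (cs : List Char) (s : Int) :
    (((PySem.List.enumerate cs s).filter (fun p => p.2 ≠ ' ')).map (fun p => p.2)) =
      cs.filter (fun c => c ≠ ' ') := by
  induction cs generalizing s with
  | nil => simp [PySem.List.enumerate]
  | cons c rest ih =>
    by_cases hc : c = ' ' <;>
      · simp only [PySem.List.enumerate_cons, List.filter_cons, hc]
        simpa [hc] using ih (s + 1)

-- ===== VERDICT =====
theorem strip_spaces_py_spec : Claim_equal_strip_spaces_py := by
  intro text _
  unfold Spec_strip_spaces_py strip_spaces_py strip_spaces_py_alt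
  have hA := stripSpacesLoopA_spec (PySem.List.enumerate text.toList 0) [] PySem.Dict.empty
    (by simp [PySem.Dict.keys_empty])
  rcases hA with ⟨h1, h2⟩
  have hempty : (PySem.Dict.empty : PySem.Dict Int Int).items = [] := rfl
  have hsplit := splitOn_eq_simpleSplit text.toList
  have hB := foldl_loopB_spec text.toList [] [] 0
  simp only [hsplit, h1, h2, hempty, List.nil_append, hB]
  rw [join_nil_eq_flatten, flatten_simpleSplit]
  rw [filter_map_snd_enumerate, ← posList_eq_enum]
  simp [posList_eq_enum]
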